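-- pv_equiv track=rewrite | github.com/aryamandarda/Code-Generation-from-Flowchart | logic.py | create_queries
-- ===== SOURCE A (Python) =====
-- def create_queries(img_text, pseudo_code_query, python_code_query):
--     for text in img_text:
--         _, text, _ = text
--         pseudo_code_query = '"# ' + pseudo_code_query + text + "\n"
--         python_code_query = '"# ' + python_code_query + text + "\n"
--     pseudo_code_query = pseudo_code_query + '\ndef"'
--     python_code_query = python_code_query + '\ndef"'
--     return pseudo_code_query, python_code_query
-- ===== SOURCE B (Python) =====
-- def create_queries(img_text, pseudo_code_query, python_code_query):
--     texts = []
--     for t in img_text: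
--         _, text, _ = t
--         texts.append(text)
--     middle = "".join(text + "\n" for text in texts)
--     prefix = '"# ' * len(texts)
--     pseudo_code_query = prefix + pseudo_code_query + middle + '\ndef"'
--     python_code_query = prefix + python_code_query + middle + '\ndef"'
--     return pseudo_code_query, python_code_query
-- ===== Notes on version B (the rewrite author's own statement) =====
-- stated objective: simpler
-- what changed: Replaces the per-iteration re-wrapping of both accumulator strings (which re-copies the growing strings each step, quadratic work) by a closed form: the prefix '"# '*n, the original query, one join of all middle texts with newlines, and the '\ndef"' suffix.
import Mathlib
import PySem

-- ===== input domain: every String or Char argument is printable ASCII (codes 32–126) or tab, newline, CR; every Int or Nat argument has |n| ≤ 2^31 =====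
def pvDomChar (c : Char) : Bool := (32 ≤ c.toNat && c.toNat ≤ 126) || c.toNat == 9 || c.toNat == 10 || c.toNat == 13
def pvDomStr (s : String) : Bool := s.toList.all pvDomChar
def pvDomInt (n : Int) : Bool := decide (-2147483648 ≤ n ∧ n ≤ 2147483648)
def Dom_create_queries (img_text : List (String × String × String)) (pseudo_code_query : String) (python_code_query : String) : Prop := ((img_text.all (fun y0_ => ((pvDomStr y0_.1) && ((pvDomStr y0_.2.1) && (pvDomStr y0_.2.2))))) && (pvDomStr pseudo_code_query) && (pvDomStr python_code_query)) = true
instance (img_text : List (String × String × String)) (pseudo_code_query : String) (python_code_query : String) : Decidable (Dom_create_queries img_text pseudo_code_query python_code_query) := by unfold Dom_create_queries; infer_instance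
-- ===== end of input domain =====

-- B replaces A's per-iteration re-wrapping of both query strings by a closed form
-- (prefix '"# '*n + query + one join of the middle texts + '\ndef"'): simpler, one pass.

-- ===== PORT A =====
-- the loop body: both accumulators are re-wrapped with the '"# ' prefix and the middle text
def create_queries (img_text : List (String × String × String)) (pseudo_code_query : String) (python_code_query : String) : String × String :=
  let r := img_text.foldl
    (fun (s : String × String) t =>
      ("\"# " ++ s.1 ++ t.2.1 ++ "\n", "\"# " ++ s.2 ++ t.2.1 ++ "\n"))
    (pseudo_code_query, python_code_query)
  (r.1 ++ "\ndef\"", r.2 ++ "\ndef\"")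

-- ===== PORT B =====
def create_queries_alt (img_text : List (String × String × String)) (pseudo_code_query : String) (python_code_query : String) : String × String :=
  let texts := img_text.map (fun t => t.2.1)
  let middle := PySem.Str.join "" (texts.map (fun text => text ++ "\n"))
  let pre := PySem.Str.join "" (List.replicate texts.length "\"# ")  -- '"# ' * len(texts)
  (pre ++ pseudo_code_query ++ middle ++ "\ndef\"",
   pre ++ python_code_query ++ middle ++ "\ndef\"")

-- ===== PRECONDITION & SPEC =====
def Spec_create_queries (img_text : List (String × String × String)) (pseudo_code_query : String) (python_code_query : String) (out : String × String) : Prop := out = create_queries_alt img_text pseudo_code_query python_code_query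
instance (img_text : List (String × String × String)) (pseudo_code_query : String) (python_code_query : String) (out : String × String) : Decidable (Spec_create_queries img_text pseudo_code_query python_code_query out) := by unfold Spec_create_queries; infer_instance

-- ===== CLAIM (what is proved, stated in full; the proofs are below) =====
def Claim_equal_create_queries : Prop := ∀ (img_text : List (String × String × String)) (pseudo_code_query : String) (python_code_query : String), Dom_create_queries img_text pseudo_code_query python_code_query → Spec_create_queries img_text pseudo_code_query python_code_query (create_queries img_text pseudo_code_query python_code_query)

-- ===== LEMMAS AND PROOFS =====
theorem pv_flat_int : ∀ (l : List (List Char)), (List.intersperse [] l).flatten = l.flatten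
  | [] => rfl
  | [a] => by simp
  | a :: b :: l => by
      simp only [List.intersperse, List.flatten_cons, List.nil_append]
      rw [pv_flat_int (b :: l)]
      simp

theorem pv_join_nil : (PySem.Str.join "" ([] : List String)).toList = [] := by
  simp [PySem.Chars.join, List.intercalate]

theorem pv_join_cons (s : String) (l : List String) :
    (PySem.Str.join "" (s :: l)).toList = s.toList ++ (PySem.Str.join "" l).toList := by
  simp [PySem.Chars.join, List.intercalate, pv_flat_int]

-- the '"# '-block prefix commutes with one more block
theorem pv_rep_comm (s : String) : ∀ (n : Nat),
    (PySem.Str.join "" (List.replicate n s)).toList ++ s.toList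
      = s.toList ++ (PySem.Str.join "" (List.replicate n s)).toList
  | 0 => by simp [pv_join_nil]
  | n + 1 => by
      rw [List.replicate_succ, pv_join_cons, List.append_assoc, pv_rep_comm s n]

-- the loop of A in closed form
theorem pv_fold_closed : ∀ (l : List (String × String × String)) (p q : String),
    (l.foldl (fun (s : String × String) t =>
        ("\"# " ++ s.1 ++ t.2.1 ++ "\n", "\"# " ++ s.2 ++ t.2.1 ++ "\n")) (p, q))
    = (String.ofList ((PySem.Str.join "" (List.replicate l.length "\"# ")).toList ++ p.toList
          ++ (PySem.Str.join "" (l.map (fun t => t.2.1 ++ "\n"))).toList),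
       String.ofList ((PySem.Str.join "" (List.replicate l.length "\"# ")).toList ++ q.toList
          ++ (PySem.Str.join "" (l.map (fun t => t.2.1 ++ "\n"))).toList))
  | [], p, q => by
      simp only [List.foldl_nil, List.length_nil, List.replicate, List.map_nil, pv_join_nil]
      simp
  | t :: l, p, q => by
      simp only [List.foldl_cons]
      rw [pv_fold_closed l]
      simp only [List.length_cons, List.map_cons, List.replicate_succ, pv_join_cons,
        Prod.mk.injEq]
      constructor <;>
      · apply congrArg String.ofList
        simp only [String.toList_append, ← List.append_assoc]
        rw [pv_rep_comm]

theorem create_queries_eq (img_text : List (String × String × String)) (p q : String) :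
    create_queries img_text p q = create_queries_alt img_text p q := by
  unfold create_queries create_queries_alt
  rw [pv_fold_closed]
  simp only [List.length_map, List.map_map, Prod.mk.injEq]
  constructor <;>
  · apply String.toList_injective
    simp [Function.comp_def, List.append_assoc]

-- ===== VERDICT (by name: the statement is the Claim_ definition above) =====
theorem create_queries_spec : Claim_equal_create_queries := by
  intro img_text p q _
  unfold Spec_create_queries
  exact create_queries_eq img_text p q
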